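-- pv_equiv track=rewrite | github.com/JB0925/Bites | Bite_287.py | sum_indices
-- ===== SOURCE A (Python) =====
-- from typing import List
--
-- def sum_indices(items: List[str]) -> int:
--     duplicates = {}
--     total = 0
--     for i in range(len(items)):
--         if items[i] in duplicates:
--             duplicates[items[i]] += i
--         else:
--             duplicates[items[i]] = i
--
--         total += max(items.index(items[i]), duplicates[items[i]])
--
--     return total
-- ===== SOURCE B (Python) =====
-- from typing import List
--
-- def sum_indices(items: List[str]) -> int:
--     # Group positions by value in one pass, then sum prefix sums per group.
--     positions = {}
--     for i, item in enumerate(items):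
--         positions.setdefault(item, []).append(i)
--     total = 0
--     for pos in positions.values():
--         running = 0
--         for p in pos:
--             running += p
--             total += running
--     return total
-- ===== Notes on version B (the rewrite author's own statement) =====
-- stated objective: faster
-- what changed: Replaced the linear scan that calls items.index (an O(n) inner scan) and keeps a running dict of index sums with a group-by-value pass: build a dict value -> list of positions once, then sum per-group prefix sums (the max is dropped because the first index never exceeds the nonnegative running index sum).
import Mathlib
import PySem

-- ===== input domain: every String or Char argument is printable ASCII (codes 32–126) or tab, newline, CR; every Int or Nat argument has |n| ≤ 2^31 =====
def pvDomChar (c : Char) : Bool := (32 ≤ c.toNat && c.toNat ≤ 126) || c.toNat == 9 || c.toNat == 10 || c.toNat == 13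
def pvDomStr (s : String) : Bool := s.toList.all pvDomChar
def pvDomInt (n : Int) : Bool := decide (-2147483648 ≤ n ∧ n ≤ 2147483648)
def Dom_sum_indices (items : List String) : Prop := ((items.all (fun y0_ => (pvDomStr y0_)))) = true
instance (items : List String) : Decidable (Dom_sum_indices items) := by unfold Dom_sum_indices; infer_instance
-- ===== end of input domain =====

-- B replaces A's linear scan with its inner items.index rescan by one group-by-value pass
-- followed by per-group prefix-sum totals (objective: faster).

-- ===== PORT A =====
-- body of A's 'for i in range(len(items))' loop; for i in range the lookups items[i] and
-- items.index(items[i]) always succeed in Python, so the .getD defaults are never used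
def stepA (L : List String) (st : PySem.Dict String Int × Int) (i : Int) :
    PySem.Dict String Int × Int :=
  let x := PySem.List.pyGetD L i ""
  let d := if st.1.contains x then st.1.insert x (st.1.getD x 0 + i) else st.1.insert x i
  (d, st.2 + max (((PySem.List.index? L x).getD 0 : Nat) : Int) (d.getD x 0))

def sum_indices (items : List String) : Int :=
  ((PySem.List.pyRange 0 (items.length : Int) 1).foldl (stepA items) (PySem.Dict.empty, 0)).2

-- ===== PORT B =====
-- positions.setdefault(item, []).append(i) rebinds positions[item] to positions.get(item, []) + [i],
-- which is exactly Dict.modify item [] (· ++ [i])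
def sum_indices_alt (items : List String) : Int :=
  let positions := (PySem.List.enumerate items 0).foldl
    (fun (d : PySem.Dict String (List Int)) p => d.modify p.2 [] (fun l => l ++ [p.1]))
    PySem.Dict.empty
  (PySem.Dict.values positions).foldl
    (fun total pos =>
      (pos.foldl (fun (st : Int × Int) p => (st.1 + p, st.2 + (st.1 + p))) ((0 : Int), total)).2)
    0

-- ===== PRECONDITION & SPEC =====
def Spec_sum_indices (items : List String) (out : Int) : Prop := out = sum_indices_alt items
instance (items : List String) (out : Int) : Decidable (Spec_sum_indices items out) := by unfold Spec_sum_indices; infer_instance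

-- ===== CLAIM (what is proved, stated in full; the proofs are below) =====
def Claim_equal_sum_indices : Prop := ∀ (items : List String), Dom_sum_indices items → Spec_sum_indices items (sum_indices items)

-- ===== LEMMAS AND PROOFS =====

def occ (items : List String) (v : String) : List Int :=
  ((PySem.List.enumerate items 0).filter (fun p => p.2 == v)).map (·.1)

theorem enumerate_append (l l' : List String) (s : Int) :
    PySem.List.enumerate (l ++ l') s
      = PySem.List.enumerate l s ++ PySem.List.enumerate l' (s + l.length) := by
  induction l generalizing s with
  | nil => simp [PySem.List.enumerate_nil]
  | cons a t ih =>
      simp [PySem.List.enumerate_cons, ih (s + 1)]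
      ring_nf

theorem occ_append_singleton (L : List String) (x v : String) :
    occ (L ++ [x]) v = occ L v ++ (if x = v then [(L.length : Int)] else []) := by
  simp [occ, enumerate_append, PySem.List.enumerate_cons, PySem.List.enumerate_nil]
  split
  · next h => subst h; simp
  · next h => simp [beq_iff_eq]; exact h

theorem enumerate_fst_ge (l : List String) : ∀ s : Int, ∀ p ∈ PySem.List.enumerate l s, s ≤ p.1 := by
  induction l with
  | nil => simp [PySem.List.enumerate_nil]
  | cons a t ih =>
      intro s p hp
      rw [PySem.List.enumerate_cons] at hp
      rcases List.mem_cons.mp hp with rfl | hp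
      · simp
      · have := ih (s+1) p hp; omega

theorem occ_nonneg (L : List String) (v : String) : ∀ p ∈ occ L v, 0 ≤ p := by
  intro p hp
  simp [occ] at hp
  exact enumerate_fst_ge L 0 (p, v) hp

theorem occ_not_mem (L : List String) (v : String) (h : v ∉ L) : occ L v = [] := by
  simp [occ, List.filter_eq_nil_iff]
  rintro i y hy rfl
  exact h (by simpa [PySem.List.map_snd_enumerate] using List.mem_map_of_mem (f := (·.2)) hy)

def foldA (L : List String) : PySem.Dict String Int × Int :=
  (PySem.List.pyRange 0 (L.length : Int) 1).foldl (stepA L) (PySem.Dict.empty, 0)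

theorem stepA_agree (L : List String) (x : String) :
    ∀ st, ∀ i ∈ PySem.List.pyRange 0 (L.length : Int) 1,
      stepA (L ++ [x]) st i = stepA L st i := by
  intro st i hi
  rw [PySem.List.mem_pyRange_one] at hi
  have h0 : 0 ≤ i := hi.1
  have h1 : i < (L.length : Int) := hi.2
  have h1' : i < ((L ++ [x]).length : Int) := by simp; omega
  have hget : PySem.List.pyGetD (L ++ [x]) i "" = PySem.List.pyGetD L i "" := by
    rw [PySem.List.pyGetD_eq_getElem (L ++ [x]) "" h0 h1', PySem.List.pyGetD_eq_getElem L "" h0 h1]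
    exact List.getElem_append_left (by omega)
  have hmem : PySem.List.pyGetD L i "" ∈ L := by
    rw [PySem.List.pyGetD_eq_getElem L "" h0 h1]
    exact List.getElem_mem _
  simp only [stepA, hget, PySem.List.index?_append_of_mem [x] hmem]

theorem foldA_snoc (L : List String) (x : String) :
    foldA (L ++ [x]) = stepA (L ++ [x]) (foldA L) (L.length : Int) := by
  unfold foldA
  have hlen : (((L ++ [x]).length : Int)) = (L.length : Int) + 1 := by simp
  rw [hlen, PySem.List.pyRange_one_succ_right (by positivity), List.foldl_append]
  simp only [List.foldl_cons, List.foldl_nil]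
  congr 1
  exact PySem.List.foldl_congr_mem _ _ _ _ (fun st j hj => stepA_agree L x st j hj)

theorem occ_sum_nonneg (L : List String) (v : String) : 0 ≤ (occ L v).sum :=
  List.sum_nonneg (occ_nonneg L v)

theorem pyGetD_snoc_last (L : List String) (x : String) :
    PySem.List.pyGetD (L ++ [x]) (L.length : Int) "" = x := by
  rw [PySem.List.pyGetD_eq_getElem (L ++ [x]) "" (by positivity) (by simp)]
  simp

theorem foldA_dict (L : List String) : ∀ v : String,
    ((foldA L).1).getD v 0 = (occ L v).sum ∧ ((foldA L).1).contains v = decide (v ∈ L) := by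
  induction L using List.reverseRecOn with
  | nil =>
      intro v
      simp [foldA, PySem.List.pyRange_one_eq_nil, occ, PySem.List.enumerate_nil,
        PySem.Dict.getD_empty, PySem.Dict.contains_empty]
  | append_singleton L x ih =>
      intro v
      rw [foldA_snoc, stepA, pyGetD_snoc_last]
      by_cases hmem : x ∈ L
      · have hc : ((foldA L).1).contains x = true := by rw [(ih x).2]; simp [hmem]
        simp only [hc, if_true]
        constructor
        · rw [PySem.Dict.getD_insert, occ_append_singleton]
          by_cases hvx : v = x
          · subst hvx
            simp [(ih v).1]
          · simp [hvx, Ne.symm hvx, (ih v).1]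
        · rw [PySem.Dict.contains_insert, (ih v).2]
          by_cases hvx : v = x <;> simp [hvx, List.mem_append]
      · have hc : ((foldA L).1).contains x = false := by rw [(ih x).2]; simp [hmem]
        simp only [hc, Bool.false_eq_true, if_false]
        constructor
        · rw [PySem.Dict.getD_insert, occ_append_singleton]
          by_cases hvx : v = x
          · subst hvx
            simp [occ_not_mem L v hmem]
          · simp [hvx, Ne.symm hvx, (ih v).1]
        · rw [PySem.Dict.contains_insert, (ih v).2]
          by_cases hvx : v = x <;> simp [hvx, List.mem_append]

theorem A_snoc (L : List String) (x : String) :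
    sum_indices (L ++ [x]) = sum_indices L + ((occ L x).sum + (L.length : Int)) := by
  have hA : sum_indices L = (foldA L).2 := rfl
  have hA' : sum_indices (L ++ [x]) = (foldA (L ++ [x])).2 := rfl
  rw [hA', foldA_snoc, stepA, pyGetD_snoc_last, hA]
  by_cases hmem : x ∈ L
  · have hc : ((foldA L).1).contains x = true := by rw [(foldA_dict L x).2]; simp [hmem]
    simp only [hc, if_true]
    rw [PySem.Dict.getD_insert]
    simp only [(foldA_dict L x).1]
    rw [PySem.List.index?_append_of_mem [x] hmem]
    obtain ⟨f, hf⟩ := Option.isSome_iff_exists.mp ((PySem.List.index?_isSome_iff L x).mpr hmem)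
    obtain ⟨pre, suf, hL, hlen, -⟩ := (PySem.List.index?_eq_some_iff L x f).mp hf
    have hflt : f < L.length := by subst hL; simp [← hlen]
    have hs : 0 ≤ (occ L x).sum := occ_sum_nonneg L x
    rw [hf]
    have : ((f : Int)) ≤ (occ L x).sum + (L.length : Int) := by
      have : (f : Int) < (L.length : Int) := by exact_mod_cast hflt
      omega
    simp [max_eq_right this]
  · have hc : ((foldA L).1).contains x = false := by rw [(foldA_dict L x).2]; simp [hmem]
    simp only [hc, Bool.false_eq_true, if_false]
    rw [PySem.Dict.getD_insert]
    rw [PySem.List.index?_append_singleton_self L x hmem]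
    rw [occ_not_mem L x hmem]
    simp

def G : Int → List Int → Int
  | _, [] => 0
  | r, p :: ps => (r + p) + G (r + p) ps

theorem G_snoc (l : List Int) (r p : Int) : G r (l ++ [p]) = G r l + (r + l.sum + p) := by
  induction l generalizing r with
  | nil => simp [G]
  | cons a t ih => simp [G, ih]; ring

theorem inner_fold (pos : List Int) (r t : Int) :
    pos.foldl (fun (st : Int × Int) p => (st.1 + p, st.2 + (st.1 + p))) (r, t)
      = (r + pos.sum, t + G r pos) := by
  induction pos generalizing r t with
  | nil => simp [G]
  | cons a ps ih => simp [ih, G]; constructor <;> ring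

def posDict (L : List String) : PySem.Dict String (List Int) :=
  (PySem.List.enumerate L 0).foldl
    (fun (d : PySem.Dict String (List Int)) p => d.modify p.2 [] (fun l => l ++ [p.1]))
    PySem.Dict.empty

theorem posDict_snoc (L : List String) (x : String) :
    posDict (L ++ [x])
      = (posDict L).insert x ((posDict L).getD x [] ++ [(L.length : Int)]) := by
  unfold posDict
  rw [enumerate_append, List.foldl_append]
  simp [PySem.List.enumerate_cons, PySem.List.enumerate_nil, PySem.Dict.modify]

theorem ofList_snoc (L : List String) (x : String) :
    PySem.Set.ofList (L ++ [x])
      = if x ∈ L then PySem.Set.ofList L else PySem.Set.ofList L ++ [x] := by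
  rw [PySem.Set.ofList_eq_foldl, List.foldl_append, ← PySem.Set.ofList_eq_foldl]
  simp only [List.foldl_cons, List.foldl_nil, PySem.Set.add, PySem.Set.contains]
  by_cases hmem : x ∈ L
  · simp [(PySem.Set.mem_ofList L x).mpr hmem, hmem]
  · simp [hmem, (PySem.Set.mem_ofList L x)]

theorem posDict_eq (L : List String) :
    posDict L = PySem.Dict.mk ((PySem.Set.ofList L).map (fun v => (v, occ L v))) := by
  induction L using List.reverseRecOn with
  | nil =>
      simp [posDict, PySem.List.enumerate_nil]
      rfl
  | append_singleton L x ih =>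
      rw [posDict_snoc, ih]
      have hkeys : (PySem.Dict.mk ((PySem.Set.ofList L).map (fun v => (v, occ L v)))).keys
          = PySem.Set.ofList L := by
        simp [PySem.Dict.keys_mk, Function.comp_def]
      have hnd : (PySem.Dict.mk ((PySem.Set.ofList L).map (fun v => (v, occ L v)))).keys.Nodup := by
        rw [hkeys]; exact PySem.Set.nodup_ofList L
      have hcont : (PySem.Dict.mk ((PySem.Set.ofList L).map (fun v => (v, occ L v)))).contains x
          = decide (x ∈ L) := by
        rw [PySem.Dict.contains_eq_decide_mem_keys, hkeys]
        simp [PySem.Set.mem_ofList]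
      apply PySem.Dict.ext
      by_cases hmem : x ∈ L
      · have hget : (PySem.Dict.mk ((PySem.Set.ofList L).map (fun v => (v, occ L v)))).getD x []
            = occ L x :=
          PySem.Dict.getD_of_mem_items _
            (List.mem_map_of_mem (f := fun v => (v, occ L v))
              ((PySem.Set.mem_ofList L x).mpr hmem)) hnd []
        rw [hget, PySem.Dict.items_insert_of_contains _ _ (by simp [hcont, hmem])]
        rw [ofList_snoc, if_pos hmem]
        simp only [List.map_map]
        apply List.map_congr_left
        intro v hv
        by_cases hvx : v = x
        · subst hvx
          simp [occ_append_singleton]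
        · simp [Function.comp, beq_iff_eq, hvx, occ_append_singleton, Ne.symm hvx]
      · have hget : (PySem.Dict.mk ((PySem.Set.ofList L).map (fun v => (v, occ L v)))).getD x []
            = [] := by
          apply PySem.Dict.getD_of_not_contains
          simp [hcont, hmem]
        rw [hget, PySem.Dict.items_insert_of_not_contains _ _ (by simp [hcont, hmem])]
        rw [ofList_snoc, if_neg hmem]
        simp only [List.map_append, List.map_cons, List.map_nil]
        congr 1
        · apply List.map_congr_left
          intro v hv
          have hvL : v ∈ L := (PySem.Set.mem_ofList L v).mp hv
          have hvx : v ≠ x := fun h => hmem (h ▸ hvL)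
          simp [occ_append_singleton, Ne.symm hvx]
        · simp [occ_append_singleton, occ_not_mem L x hmem]

theorem B_eval (L : List String) :
    sum_indices_alt L = ((PySem.Set.ofList L).map (fun v => G 0 (occ L v))).sum := by
  show (PySem.Dict.values (posDict L)).foldl _ 0 = _
  rw [posDict_eq, PySem.Dict.values_mk]
  rw [PySem.List.foldl_congr_mem _ _
    (fun total pos => total + G 0 pos) _
    (by intro acc pos _; rw [inner_fold])]
  rw [PySem.List.foldl_add]
  simp [List.map_map, Function.comp_def]

theorem sum_map_one_point {f g : String → Int} (x : String) :
    ∀ (S : List String), S.Nodup → x ∈ S → (∀ v ∈ S, v ≠ x → f v = g v) →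
      (S.map f).sum = (S.map g).sum + (f x - g x) := by
  intro S
  induction S with
  | nil => simp
  | cons a t ih =>
      intro hnd hx hfg
      rcases List.mem_cons.mp hx with rfl | hxt
      · have : ∀ v ∈ t, f v = g v := by
          intro v hv
          exact hfg v (List.mem_cons_of_mem _ hv) (fun h => (List.nodup_cons.mp hnd).1 (h ▸ hv))
        simp [List.map_congr_left this]; ring
      · have ha : a ≠ x := fun h => (List.nodup_cons.mp hnd).1 (h ▸ hxt)
        have := ih (List.nodup_cons.mp hnd).2 hxt
          (fun v hv hvx => hfg v (List.mem_cons_of_mem _ hv) hvx)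
        simp [this, hfg a (List.mem_cons_self) ha]; ring

theorem B_snoc (L : List String) (x : String) :
    sum_indices_alt (L ++ [x]) = sum_indices_alt L + ((occ L x).sum + (L.length : Int)) := by
  rw [B_eval, B_eval, ofList_snoc]
  by_cases hmem : x ∈ L
  · rw [if_pos hmem]
    rw [sum_map_one_point (f := fun v => G 0 (occ (L ++ [x]) v))
      (g := fun v => G 0 (occ L v)) x (PySem.Set.ofList L) (PySem.Set.nodup_ofList L)
      ((PySem.Set.mem_ofList L x).mpr hmem)
      (by intro v hv hvx; simp [occ_append_singleton, Ne.symm hvx])]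
    rw [occ_append_singleton, if_pos rfl, G_snoc]
    ring
  · rw [if_neg hmem]
    simp only [List.map_append, List.map_cons, List.map_nil, List.sum_append]
    rw [occ_append_singleton, if_pos rfl, occ_not_mem L x hmem]
    have : ∀ v ∈ PySem.Set.ofList L, G 0 (occ (L ++ [x]) v) = G 0 (occ L v) := by
      intro v hv
      have hvL : v ∈ L := (PySem.Set.mem_ofList L v).mp hv
      have hvx : v ≠ x := fun h => hmem (h ▸ hvL)
      simp [occ_append_singleton, Ne.symm hvx]
    rw [List.map_congr_left this]
    simp [G]

theorem A_eq_B (items : List String) : sum_indices items = sum_indices_alt items := by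
  induction items using List.reverseRecOn with
  | nil => decide
  | append_singleton L x ih => rw [A_snoc, B_snoc, ih]

-- ===== VERDICT (by name: the statement is the Claim_ definition above) =====
theorem sum_indices_spec : Claim_equal_sum_indices := by
  intro items _
  unfold Spec_sum_indices
  exact A_eq_B items
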